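-- pv_equiv track=rewrite | github.com/DimaAtamanov/rewriter | rewriter_script.py | make_list_paragaphs
-- ===== SOURCE A (Python) =====
-- def make_list_paragaphs(text: str) -> list[str]:
--     """Выделяет параграфы из текста на основе заголовков первого и второго уровня.
--
--     Args:
--         text (str): текст статьи
--
--     Returns:
--         list[str]: Список параграфов
--     """
--     split_text = [rows for rows in text.split("\n") if len(rows) != 0]
--     paragraphs = []
--     i = 0
--
--     while i < len(split_text):
--         if len(split_text[i]) < 100 and "#" in split_text[i]:
--             j = i + 1
--             paragraph = []
--             while len(split_text[j]) > 100 or split_text[j].count("#") > 2: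
--                 paragraph.append(split_text[j])
--                 j += 1
--                 if j == len(split_text):
--                     break
--             if len(paragraph) > 0:
--                 paragraphs.append("\n".join(paragraph))
--             i = j
--             continue
--         i += 1
--
--     return paragraphs
-- ===== SOURCE B (Python) =====
-- def make_list_paragaphs(text: str) -> list[str]:
--     """Single left-to-right pass with a collecting flag and a current buffer
--     instead of nested while-loops with index jumping."""
--     results = []
--     current = []
--     collecting = False
--     for line in text.split("\n"):
--         if not line:
--             continue
--         if collecting and (len(line) > 100 or line.count("#") > 2):
--             current.append(line)
--             continue
--         if collecting:
--             if current:
--                 results.append("\n".join(current))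
--             current = []
--             collecting = False
--         if len(line) < 100 and "#" in line:
--             collecting = True
--     if current:
--         results.append("\n".join(current))
--     return results
-- ===== Notes on version B (the rewrite author's own statement) =====
-- stated objective: simpler
-- what changed: Replaces the nested while-loops with index jumping by one linear pass over the lines using a boolean collecting flag and a current buffer; flushing and re-testing the stopping line as a heading happens in the same iteration.
import Mathlib
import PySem

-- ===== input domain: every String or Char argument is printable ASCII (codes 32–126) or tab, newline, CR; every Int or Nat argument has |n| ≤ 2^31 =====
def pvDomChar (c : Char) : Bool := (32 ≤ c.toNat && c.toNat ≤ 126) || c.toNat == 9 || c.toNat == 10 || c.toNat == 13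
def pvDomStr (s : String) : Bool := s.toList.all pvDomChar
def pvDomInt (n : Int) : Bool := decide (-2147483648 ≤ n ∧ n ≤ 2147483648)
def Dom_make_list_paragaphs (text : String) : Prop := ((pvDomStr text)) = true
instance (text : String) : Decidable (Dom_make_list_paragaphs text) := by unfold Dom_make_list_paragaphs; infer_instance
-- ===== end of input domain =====

-- B replaces A's nested index-jumping while-loops by one linear pass with a collecting flag
-- and a current buffer (objective: simpler); same return value wherever A returns (Pre_).

-- shared tests, exactly the Python conditions
-- len(s) < 100 and "#" in s
def pvHeading (s : String) : Bool := decide (PySem.Str.len s < 100) && PySem.Str.isIn "#" s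
-- len(s) > 100 or s.count("#") > 2
def pvContent (s : String) : Bool := decide (PySem.Str.len s > 100) || decide (PySem.Str.count s "#" > 2)
-- [rows for rows in text.split("\n") if len(rows) != 0]
-- split? is some here since the separator "\n" is nonempty
def pvLines (text : String) : List String :=
  ((PySem.Str.split? text "\n").getD []).filter (fun r => PySem.Str.len r != 0)

-- ===== PORT A =====
-- inner while loop: returns the final (j, paragraph); on Python's IndexError (pyGet? = none,
-- only reachable outside Pre_) it just stops
def pvAInner (xs : List String) (j : Nat) (p : List String) : Nat × List String :=
  match h : PySem.List.pyGet? xs (j : Int) with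
  | none => (j, p)        -- IndexError in Python; excluded by Pre_
  | some s =>
    if pvContent s then
      if j + 1 = xs.length then (j + 1, p ++ [s])   -- the 'if j == len: break'
      else pvAInner xs (j + 1) (p ++ [s])
    else (j, p)
termination_by xs.length - j
decreasing_by
  simp only [PySem.List.pyGet?_natCast] at h
  obtain ⟨hlt, -⟩ := List.getElem?_eq_some_iff.mp h
  omega

theorem pvAInner_ge (xs : List String) (j : Nat) (p : List String) :
    j ≤ (pvAInner xs j p).1 := by
  fun_induction pvAInner xs j p <;> simp_all <;> omega

-- outer while loop over i with the paragraphs accumulator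
def pvAOuter (xs : List String) (i : Nat) (acc : List String) : List String :=
  if hi : i < xs.length then
    if pvHeading xs[i] then
      let r := pvAInner xs (i + 1) []
      pvAOuter xs r.1 (if r.2.length > 0 then acc ++ [PySem.Str.join "\n" r.2] else acc)
    else pvAOuter xs (i + 1) acc
  else acc
termination_by xs.length - i
decreasing_by
  · have := pvAInner_ge xs (i + 1) []
    omega
  · omega

def make_list_paragaphs (text : String) : List String :=
  pvAOuter (pvLines text) 0 []

-- ===== PORT B =====
-- single pass: collecting flag, current buffer, results accumulator
def pvBLoop (lines : List String) (collecting : Bool) (cur acc : List String) : List String :=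
  match lines with
  | [] => if cur.length > 0 then acc ++ [PySem.Str.join "\n" cur] else acc
  | s :: rest =>
    if collecting && pvContent s then pvBLoop rest true (cur ++ [s]) acc
    else if collecting then
      pvBLoop rest (pvHeading s) []
        (if cur.length > 0 then acc ++ [PySem.Str.join "\n" cur] else acc)
    else pvBLoop rest (pvHeading s) cur acc

def make_list_paragaphs_alt (text : String) : List String :=
  pvBLoop (pvLines text) false [] []

-- ===== PRECONDITION & SPEC =====
-- Pre_ excludes exactly the inputs on which the Python A raises IndexError: the last
-- non-empty line is a heading and no earlier heading is followed only by content lines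
-- (so the scan reaches that last heading and indexes past the end).
def Pre_make_list_paragaphs (text : String) : Prop :=
  pvLines text = [] ∨
  pvHeading ((pvLines text).getD ((pvLines text).length - 1) "") = false ∨
  (∃ k < (pvLines text).length, k + 1 < (pvLines text).length ∧
    pvHeading ((pvLines text).getD k "") = true ∧
    ∀ j < (pvLines text).length, k < j → pvContent ((pvLines text).getD j "") = true)
instance (text : String) : Decidable (Pre_make_list_paragaphs text) := by
  unfold Pre_make_list_paragaphs; infer_instance

def pvWitness_make_list_paragaphs : String := "# h\nx"

def Spec_make_list_paragaphs (text : String) (out : List String) : Prop :=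
  out = make_list_paragaphs_alt text
instance (text : String) (out : List String) : Decidable (Spec_make_list_paragaphs text out) := by
  unfold Spec_make_list_paragaphs; infer_instance

-- ===== CLAIM (what is proved, stated in full; the proofs are below) =====
def Claim_equal_make_list_paragaphs : Prop := ∀ (text : String), Dom_make_list_paragaphs text → Pre_make_list_paragaphs text → Spec_make_list_paragaphs text (make_list_paragaphs text)

-- ===== LEMMAS AND PROOFS =====

-- the collecting phase: running A's inner loop from j with buffer p, flushing its paragraph,
-- and continuing A's outer loop equals B's loop on the suffix from j in collecting state
theorem pv_inner_phase (xs : List String) :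
    ∀ (m j : Nat) (p acc : List String), xs.length - j ≤ m →
    (∀ i' acc', j ≤ i' → pvAOuter xs i' acc' = pvBLoop (xs.drop i') false [] acc') →
    pvAOuter xs (pvAInner xs j p).1
        (if (pvAInner xs j p).2.length > 0
          then acc ++ [PySem.Str.join "\n" (pvAInner xs j p).2] else acc)
      = pvBLoop (xs.drop j) true p acc := by
  intro m
  induction m with
  | zero =>
    intro j p acc hm _
    have hj : xs.length ≤ j := by omega
    have hnone : PySem.List.pyGet? xs (j : Int) = none := by
      rw [PySem.List.pyGet?_natCast]; exact List.getElem?_eq_none hj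
    have hA : pvAInner xs j p = (j, p) := by rw [pvAInner.eq_def, hnone]
    rw [hA, List.drop_eq_nil_of_le hj, pvAOuter.eq_def]
    simp [pvBLoop, Nat.not_lt.mpr hj]
  | succ m ih =>
    intro j p acc hm H
    by_cases hj : j < xs.length
    · have hsome : PySem.List.pyGet? xs (j : Int) = some xs[j] := by
        rw [PySem.List.pyGet?_natCast]; exact List.getElem?_eq_getElem hj
      have hdrop : xs.drop j = xs[j] :: xs.drop (j + 1) := (List.getElem_cons_drop hj).symm
      by_cases hc : pvContent xs[j] = true
      · by_cases hlen : j + 1 = xs.length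
        · have hA : pvAInner xs j p = (j + 1, p ++ [xs[j]]) := by
            rw [pvAInner.eq_def, hsome]; simp [hc, hlen]
          have hnil : xs.drop (j + 1) = [] := List.drop_eq_nil_of_le (by omega)
          rw [hA, hdrop, hnil, pvAOuter.eq_def]
          simp [pvBLoop, hc, Nat.not_lt.mpr (Nat.le_of_eq hlen.symm)]
        · have hA : pvAInner xs j p = pvAInner xs (j + 1) (p ++ [xs[j]]) := by
            rw [pvAInner.eq_def, hsome]; simp [hc, hlen]
          have hstep : pvBLoop (xs[j] :: xs.drop (j + 1)) true p acc
              = pvBLoop (xs.drop (j + 1)) true (p ++ [xs[j]]) acc := by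
            simp [pvBLoop, hc]
          rw [hA, hdrop, hstep]
          exact ih (j + 1) (p ++ [xs[j]]) acc (by omega)
            (fun i' acc' hi' => H i' acc' (by omega))
      · have hA : pvAInner xs j p = (j, p) := by
          rw [pvAInner.eq_def, hsome]; simp [hc]
        rw [hA, H j _ (le_refl j), hdrop]
        simp [pvBLoop, hc]
    · have hj' : xs.length ≤ j := by omega
      have hnone : PySem.List.pyGet? xs (j : Int) = none := by
        rw [PySem.List.pyGet?_natCast]; exact List.getElem?_eq_none hj'
      have hA : pvAInner xs j p = (j, p) := by rw [pvAInner.eq_def, hnone]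
      rw [hA, List.drop_eq_nil_of_le hj', pvAOuter.eq_def]
      simp [pvBLoop, Nat.not_lt.mpr hj']

-- not-collecting phase: A's outer loop from i equals B's loop on the suffix from i
theorem pv_outer_phase (xs : List String) :
    ∀ (n i : Nat) (acc : List String), xs.length - i ≤ n →
    pvAOuter xs i acc = pvBLoop (xs.drop i) false [] acc := by
  intro n
  induction n with
  | zero =>
    intro i acc hn
    have hi : xs.length ≤ i := by omega
    rw [pvAOuter.eq_def, List.drop_eq_nil_of_le hi]
    simp [pvBLoop, Nat.not_lt.mpr hi]
  | succ n ih =>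
    intro i acc hn
    by_cases hi : i < xs.length
    · have hdrop : xs.drop i = xs[i] :: xs.drop (i + 1) := (List.getElem_cons_drop hi).symm
      rw [pvAOuter.eq_def]
      simp only [hi, dif_pos]
      by_cases hh : pvHeading xs[i] = true
      · have hstep : pvBLoop (xs.drop i) false [] acc
            = pvBLoop (xs.drop (i + 1)) true [] acc := by
          rw [hdrop]; simp [pvBLoop, hh]
        rw [hstep]
        simp only [hh, if_true]
        exact pv_inner_phase xs n (i + 1) [] acc (by omega)
          (fun i' acc' hi' => ih i' acc' (by omega))
      · simp only [hh]
        rw [ih (i + 1) acc (by omega), hdrop]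
        simp [pvBLoop, hh]
    · have hi' : xs.length ≤ i := by omega
      rw [pvAOuter.eq_def, List.drop_eq_nil_of_le hi']
      simp [pvBLoop, Nat.not_lt.mpr hi']

-- ===== VERDICT (by name: the statement is the Claim_ definition above) =====
theorem make_list_paragaphs_spec : Claim_equal_make_list_paragaphs := by
  intro text _ _
  unfold Spec_make_list_paragaphs make_list_paragaphs make_list_paragaphs_alt
  simpa using pv_outer_phase (pvLines text) (pvLines text).length 0 [] (by omega)
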